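-- pv_equiv track=rewrite | github.com/RoohitD/tictactoe | tictactoe.py | checkFirstDgl
-- ===== SOURCE A (Python) =====
-- X = "X"
--
-- O = "O"
--
-- def player(board):
--     """
--     Returns player who has the next turn on a board.
--     """
--     countO = 0
--     countX = 0
--
--     for row in range(len(board)):
--         for col in range(len(board[row])):
--             if board[row][col] == O:
--                 countO += 1
--             if board[row][col] == X:
--                 countX += 1
--
--     if countX > countO:
--         return O
--     else:
--         return X
--
-- def checkFirstDgl(board, player):
--     count = 0
--     for row in range(len(board)):
--         for col in range(len(board[row])):
--             if row == col and board[row][col] == player: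
--                 count += 1
--
--     if count == 3:
--         return True
--     else:
--         return False
-- ===== SOURCE B (Python) =====
-- def checkFirstDgl(board, player):
--     def diag(rows, i):
--         if not rows:
--             return []
--         head = rows[0]
--         cell = [head[i]] if i < len(head) else []
--         return cell + diag(rows[1:], i + 1)
--     return diag(board, 0).count(player) == 3
-- ===== Notes on version B (the rewrite author's own statement) =====
-- stated objective: alternative
-- what changed: Replaces A's nested index loops over every cell (filtered by row==col) with a recursive helper that extracts the diagonal as a list while consuming the board, then tests list.count(player) == 3.
import Mathlib
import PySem

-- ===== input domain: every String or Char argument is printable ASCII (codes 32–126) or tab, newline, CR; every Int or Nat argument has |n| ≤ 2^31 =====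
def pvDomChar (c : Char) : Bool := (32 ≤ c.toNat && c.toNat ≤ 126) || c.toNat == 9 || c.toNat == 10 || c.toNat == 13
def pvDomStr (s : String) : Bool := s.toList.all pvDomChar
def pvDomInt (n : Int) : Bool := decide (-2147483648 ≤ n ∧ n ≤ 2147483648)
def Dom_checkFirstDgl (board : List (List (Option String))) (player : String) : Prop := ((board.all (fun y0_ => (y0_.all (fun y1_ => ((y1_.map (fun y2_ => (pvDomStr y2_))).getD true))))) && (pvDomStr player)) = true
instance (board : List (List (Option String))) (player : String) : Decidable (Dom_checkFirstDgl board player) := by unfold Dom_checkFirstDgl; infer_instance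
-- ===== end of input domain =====

-- B replaces A's nested index loops over every cell (filtered by row == col) by a recursive
-- helper that extracts the diagonal as a list while consuming the board, then counts.

-- ===== PORT A =====
-- nested loop over all cells, counting diagonal cells equal to player
def checkFirstDgl (board : List (List (Option String))) (player : String) : Bool :=
  let count := (List.range board.length).foldl (fun cnt row =>
    let r := board.getD row []
    (List.range r.length).foldl (fun cnt col =>
      if row == col && r.getD col none == some player then cnt + 1 else cnt) cnt) 0
  if count == 3 then true else false

-- ===== PORT B =====
-- recursive extraction of the diagonal list (skipping rows too short), then count
def pvDiag : List (List (Option String)) → Nat → List (Option String)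
  | [], _ => []
  | head :: rest, i => (if i < head.length then [head.getD i none] else []) ++ pvDiag rest (i + 1)

def checkFirstDgl_alt (board : List (List (Option String))) (player : String) : Bool :=
  PySem.List.count (pvDiag board 0) (some player) == 3

-- ===== PRECONDITION & SPEC =====
def Spec_checkFirstDgl (board : List (List (Option String))) (player : String) (out : Bool) : Prop := out = checkFirstDgl_alt board player
instance (board : List (List (Option String))) (player : String) (out : Bool) : Decidable (Spec_checkFirstDgl board player out) := by unfold Spec_checkFirstDgl; infer_instance

-- ===== CLAIM (what is proved, stated in full; the proofs are below) =====
def Claim_equal_checkFirstDgl : Prop := ∀ (board : List (List (Option String))) (player : String), Dom_checkFirstDgl board player → Spec_checkFirstDgl board player (checkFirstDgl board player)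

-- ===== LEMMAS AND PROOFS =====

-- A's inner loop over a row's columns adds 1 exactly when the diagonal cell exists and equals player
theorem innerLoop_eq (player : String) (row : Nat) (r : List (Option String)) (n : Nat) (c : Nat) :
    (List.range n).foldl (fun cnt col =>
      if row == col && r.getD col none == some player then cnt + 1 else cnt) c
    = c + (if decide (row < n) && r.getD row none == some player then 1 else 0) := by
  induction n generalizing c with
  | zero => simp
  | succ n ih =>
    rw [List.range_succ, List.foldl_append, ih]
    simp only [List.foldl_cons, List.foldl_nil]
    by_cases h : row = n
    · subst h
      simp only [Nat.lt_irrefl, Nat.lt_succ_self, beq_self_eq_true, decide_true, decide_false,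
        Bool.false_and, Bool.true_and]
      split <;> simp
    · have h1 : (row == n) = false := by simp [h]
      have h2 : (row < n + 1) = (row < n) := by
        apply propext; omega
      simp [h1, h2]

-- counting fold over a list equals an offset plus countP
theorem foldl_if_countP {α : Type} (P : α → Bool) (l : List α) (c : Nat) :
    l.foldl (fun cnt x => if P x then cnt + 1 else cnt) c = c + l.countP P := by
  induction l generalizing c with
  | nil => simp
  | cons x xs ih =>
    simp only [List.foldl_cons, List.countP_cons, ih]
    split <;> omega

-- the diagonal list's count equals the countP over row indices, for any starting offset k
theorem pvDiag_count (player : String) (bs : List (List (Option String))) (k : Nat) :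
    (pvDiag bs k).count (some player)
      = (List.range bs.length).countP
          (fun j => decide (k + j < (bs.getD j []).length)
                    && (bs.getD j []).getD (k + j) none == some player) := by
  induction bs generalizing k with
  | nil => simp [pvDiag]
  | cons h t ih =>
    simp only [pvDiag, List.count_append, List.length_cons, List.range_succ_eq_map,
      List.countP_cons, List.countP_map]
    have hrec := ih (k + 1)
    have : (List.range t.length).countP
        (fun j => decide (k + (j + 1) < ((h :: t).getD (j + 1) []).length)
                  && ((h :: t).getD (j + 1) []).getD (k + (j + 1)) none == some player)
        = (pvDiag t (k + 1)).count (some player) := by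
      rw [hrec]
      apply List.countP_congr
      intro j _
      have e1 : k + (j + 1) = k + 1 + j := by omega
      simp [e1]
    simp only [Nat.succ_eq_add_one, Function.comp_def]
    rw [this]
    have hh : List.count (some player) (if k < h.length then [h.getD k none] else [])
        = if (decide (k + 0 < ((h :: t).getD 0 []).length)
              && ((h :: t).getD 0 []).getD (k + 0) none == some player) = true then 1 else 0 := by
      by_cases hk : k < h.length
      · simp [hk, List.count_cons]
      · simp [hk]
    rw [hh]
    omega

theorem checkFirstDgl_spec : Claim_equal_checkFirstDgl := by
  intro board player _
  unfold Spec_checkFirstDgl checkFirstDgl checkFirstDgl_alt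
  simp only
  have step : (List.range board.length).foldl (fun cnt row =>
      (List.range (board.getD row []).length).foldl (fun cnt col =>
        if row == col && (board.getD row []).getD col none == some player then cnt + 1 else cnt) cnt) 0
      = (List.range board.length).foldl (fun cnt j =>
          if decide (j < (board.getD j []).length) && (board.getD j []).getD j none == some player
          then cnt + 1 else cnt) 0 := by
    apply PySem.List.foldl_congr_mem
    intro c j _
    rw [innerLoop_eq]
    split <;> simp
  rw [step, foldl_if_countP, PySem.List.count_eq]
  have := pvDiag_count player board 0
  simp only [Nat.zero_add] at this
  rw [this]
  cases h : (List.range board.length).countP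
      (fun j => decide (j < (board.getD j []).length)
                && (board.getD j []).getD j none == some player) == 3 <;> simp_all
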